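-- pv_equiv track=rewrite | github.com/todayis-sunny/Algorithm | SWEA/D2/1961. 숫자 배열 회전/숫자 배열 회전.py | solution
-- ===== SOURCE A (Python) =====
-- def solution(array, angle, index):
--     value = ""
--     if angle == 90:
--         for a in range(len(array)):
--             value += str(array[-(a + 1)][index])
--     elif angle == 180:
--         for a in range(len(array)):
--             value += str(array[-(index + 1)][-(a + 1)])
--     elif angle == 270:
--         for a in range(len(array)):
--             value += str(array[a][-(index + 1)])
--
--     return value
-- ===== SOURCE B (Python) =====
-- def solution(array, angle, index):
--     # Rotate the whole grid first (transpose+reverse per quarter turn), then read one row.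
--     turns = {90: 1, 180: 2, 270: 3}.get(angle)
--     if turns is None:
--         return ''
--     grid = array
--     for _ in range(turns):
--         grid = [list(row) for row in zip(*grid[::-1])]
--     return ''.join(str(v) for v in grid[index])
-- ===== Notes on version B (the rewrite author's own statement) =====
-- stated objective: alternative
-- what changed: B maps the angle to a quarter-turn count, builds the fully rotated grid by repeated transpose+reverse (zip(*g[::-1])) and joins the indexed row, instead of A's three per-element index-arithmetic accumulator loops, at the cost of touching the whole grid; Pre_ excludes, for the three rotation angles, empty or non-square/ragged matrices and out-of-range indices, where A raises or its single-line reads are accidents of per-element indexing that a full-grid rotation does not reproduce.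
-- outside the precondition, e.g. on solution([], 90, 0): A returns '', B raises IndexError; on solution([[1, 2, 3], [4, 5, 6]], 180, 0): A returns '65', B returns '654'; on solution([[1, 2], [3]], 90, -1): A returns '32', B returns '31'
import Mathlib
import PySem

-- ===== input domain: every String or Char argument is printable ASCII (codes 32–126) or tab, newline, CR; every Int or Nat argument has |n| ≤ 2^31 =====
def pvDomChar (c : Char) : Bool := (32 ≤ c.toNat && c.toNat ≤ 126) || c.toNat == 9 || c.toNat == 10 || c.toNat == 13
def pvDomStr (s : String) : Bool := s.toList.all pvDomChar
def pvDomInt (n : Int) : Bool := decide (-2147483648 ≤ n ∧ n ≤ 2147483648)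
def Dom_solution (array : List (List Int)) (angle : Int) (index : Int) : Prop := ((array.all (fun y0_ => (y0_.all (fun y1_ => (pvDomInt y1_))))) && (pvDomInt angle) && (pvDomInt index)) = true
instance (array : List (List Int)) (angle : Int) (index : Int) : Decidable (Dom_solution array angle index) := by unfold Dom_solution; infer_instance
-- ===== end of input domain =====

-- B rotates the whole grid (transpose+reverse per quarter turn) and then reads one row,
-- instead of A's three per-element index-arithmetic loops (objective: alternative decomposition).

-- ===== PORT A =====
def solution (array : List (List Int)) (angle : Int) (index : Int) : String :=
  if angle = 90 then
    (PySem.List.pyRange 0 (array.length : Int) 1).foldl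
      (fun value a =>
        value ++ PySem.Int.toStr (PySem.List.pyGetD (PySem.List.pyGetD array (-(a + 1)) []) index 0)) ""
  else if angle = 180 then
    (PySem.List.pyRange 0 (array.length : Int) 1).foldl
      (fun value a =>
        value ++ PySem.Int.toStr (PySem.List.pyGetD (PySem.List.pyGetD array (-(index + 1)) []) (-(a + 1)) 0)) ""
  else if angle = 270 then
    (PySem.List.pyRange 0 (array.length : Int) 1).foldl
      (fun value a =>
        value ++ PySem.Int.toStr (PySem.List.pyGetD (PySem.List.pyGetD array a []) (-(index + 1)) 0)) ""
  else ""

-- ===== PORT B =====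
-- zip(*rows) as a list of lists: one tuple per column up to the shortest row.
-- Exact here: the getD default is never used, since i < every row's length.
def pyZipStar (rows : List (List Int)) : List (List Int) :=
  (List.range (((rows.map List.length).min?).getD 0)).map
    (fun i => rows.map (fun r => r.getD i 0))

def solution_alt (array : List (List Int)) (angle : Int) (index : Int) : String :=
  match PySem.Dict.get? (PySem.Dict.ofList [((90 : Int), (1 : Nat)), (180, 2), (270, 3)]) angle with
  | none => ""
  | some turns =>
    let grid := (List.range turns).foldl (fun g _ => pyZipStar g.reverse) array
    PySem.Str.join "" ((PySem.List.pyGetD grid index []).map (fun v => PySem.Int.toStr v))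

-- ===== PRECONDITION & SPEC =====
-- Pre_ excludes, for the three rotation angles, the inputs on which A raises IndexError and the
-- empty or non-square/ragged matrices and out-of-range indices, where A's single-line reads are
-- accidents of its per-element indexing (or B's full-grid rotation raises) — see claim cites.
def Pre_solution (array : List (List Int)) (angle : Int) (index : Int) : Prop :=
  ((angle = 90 ∨ angle = 180 ∨ angle = 270) ∧
    array ≠ [] ∧ (∀ row ∈ array, row.length = array.length) ∧
    -(array.length : Int) ≤ index ∧ index < (array.length : Int)) ∨
  (angle ≠ 90 ∧ angle ≠ 180 ∧ angle ≠ 270)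
instance (array : List (List Int)) (angle : Int) (index : Int) : Decidable (Pre_solution array angle index) := by unfold Pre_solution; infer_instance

def pvWitness_solution : List (List Int) × Int × Int := ([[1, 2], [3, 4]], 90, 0)


def Spec_solution (array : List (List Int)) (angle : Int) (index : Int) (out : String) : Prop := out = solution_alt array angle index
instance (array : List (List Int)) (angle : Int) (index : Int) (out : String) : Decidable (Spec_solution array angle index out) := by unfold Spec_solution; infer_instance

-- ===== CLAIM (what is proved, stated in full; the proofs are below) =====
def Claim_equal_solution : Prop := ∀ (array : List (List Int)) (angle : Int) (index : Int), Dom_solution array angle index → Pre_solution array angle index → Spec_solution array angle index (solution array angle index)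

-- ===== LEMMAS AND PROOFS =====

-- ''.join over List Char concatenates
theorem chars_join_empty (l : List (List Char)) : PySem.Chars.join [] l = l.flatten := by
  induction l with
  | nil => exact PySem.Chars.join_nil []
  | cons a t ih =>
    cases t with
    | nil => simp [PySem.Chars.join_singleton [] a]
    | cons b r =>
      rw [PySem.Chars.join_cons_cons]
      simp [ih]

theorem str_join_empty_nil : PySem.Str.join "" ([] : List String) = "" := by
  apply String.toList_inj.mp
  simp [pysem]

theorem str_join_empty_cons (p : String) (parts : List String) :
    PySem.Str.join "" (p :: parts) = p ++ PySem.Str.join "" parts := by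
  apply String.toList_inj.mp
  simp [pysem, chars_join_empty, String.toList_append]

-- A's `value += f(x)` loop is ''.join(map(f, xs))
theorem strfold {α : Type} (l : List α) (f : α → String) (s : String) :
    l.foldl (fun v x => v ++ f x) s = s ++ PySem.Str.join "" (l.map f) := by
  induction l generalizing s with
  | nil => simp [str_join_empty_nil]
  | cons x t ih => simp [List.foldl_cons, ih, str_join_empty_cons, String.append_assoc]

-- min of a nonempty constant list
theorem foldl_min_const (t : List Nat) (n : Nat) (h : ∀ x ∈ t, x = n) : t.foldl min n = n := by
  induction t with
  | nil => rfl
  | cons x r ih =>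
    have hx : x = n := h x (by simp)
    simp [hx, ih (fun y hy => h y (by simp [hy]))]

theorem min?_const (l : List Nat) (n : Nat) (h0 : l ≠ []) (h : ∀ x ∈ l, x = n) :
    l.min?.getD 0 = n := by
  cases l with
  | nil => exact absurd rfl h0
  | cons x t =>
    rw [List.min?_cons']
    have hx : x = n := h x (by simp)
    simp [hx, foldl_min_const t n (fun y hy => h y (by simp [hy]))]

-- zip(*g) on a grid whose rows all have length n
theorem pyZipStar_square (g : List (List Int)) (n : Nat) (hne : g ≠ [])
    (h : ∀ r ∈ g, r.length = n) :
    pyZipStar g = (List.range n).map (fun i => g.map (fun r => r.getD i 0)) := by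
  unfold pyZipStar
  rw [min?_const (g.map List.length) n (by simp [hne])
    (fun x hx => by rcases List.mem_map.mp hx with ⟨r, hr, rfl⟩; exact h r hr)]

-- python l[index] with a possibly negative in-range index
theorem pyGetD_wrap {α : Type} (l : List α) (d : α) (index : Int)
    (h1 : -(l.length : Int) ≤ index) (h2 : index < (l.length : Int)) :
    PySem.List.pyGetD l index d
      = l.getD (if index < 0 then (index + l.length).toNat else index.toNat) d := by
  by_cases hneg : index < 0
  · rw [if_pos hneg]
    have hrw : index = -((((-index).toNat : Nat)) : Int) := by omega
    conv_lhs => rw [hrw]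
    rw [PySem.List.pyGetD_neg_natCast l _ d (by omega) (by omega)]
    have hidx : l.length - (-index).toNat = (index + l.length).toNat := by omega
    rw [List.getD_eq_getElem l d (by omega)]
    simp only [hidx]
  · rw [PySem.List.pyGetD_eq_getElem l d (by omega) h2, if_neg hneg,
      List.getD_eq_getElem l d (by omega)]

theorem branch90 (array : List (List Int)) (index : Int)
    (hne : array ≠ []) (hsq : ∀ row ∈ array, row.length = array.length)
    (h1 : -(array.length : Int) ≤ index) (h2 : index < (array.length : Int)) :
    (PySem.List.pyRange 0 (array.length : Int) 1).foldl
      (fun value a =>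
        value ++ PySem.Int.toStr (PySem.List.pyGetD (PySem.List.pyGetD array (-(a + 1)) []) index 0)) ""
      = solution_alt array 90 index := by
  have hn : 0 < array.length := by cases array with | nil => exact absurd rfl hne | cons _ _ => simp
  have hget : PySem.Dict.get? (PySem.Dict.ofList [((90 : Int), (1 : Nat)), (180, 2), (270, 3)]) 90
      = some 1 := by decide
  unfold solution_alt
  rw [hget]
  simp only [List.range_succ, List.range_zero, List.nil_append, List.foldl_cons, List.foldl_nil]
  rw [pyZipStar_square array.reverse array.length (by simp [hne])
    (fun r hr => hsq r (List.mem_reverse.mp hr))]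
  rw [pyGetD_wrap _ _ index (by simpa using h1) (by simpa using h2)]
  simp only [List.length_map, List.length_range]
  rw [PySem.List.getD_map_range _ _ _ _ (by split_ifs <;> omega)]
  rw [strfold]
  have hlist : (PySem.List.pyRange 0 (array.length : Int) 1).map
      (fun a => PySem.Int.toStr (PySem.List.pyGetD (PySem.List.pyGetD array (-(a + 1)) []) index 0))
      = (array.reverse.map
          (fun r => r.getD (if index < 0 then (index + (array.length : Int)).toNat else index.toNat) 0)).map
        (fun v => PySem.Int.toStr v) := by
    rw [PySem.List.pyRange_one]
    simp only [List.map_map]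
    apply List.ext_getElem
    · simp
    · intro i hi1 hi2
      simp only [List.getElem_map, List.getElem_range, Function.comp]
      have hilt : i < array.length := by simpa using hi1
      have hcast : -((0 : Int) + (i : Int) + 1) = -(((i + 1 : Nat) : Int)) := by push_cast; ring
      rw [hcast, PySem.List.pyGetD_neg_natCast array (i + 1) [] (by omega) (by omega)]
      have hmem : array[array.length - (i + 1)] ∈ array := List.getElem_mem _
      have hlen : (array[array.length - (i + 1)]).length = array.length := hsq _ hmem
      rw [pyGetD_wrap _ _ index (by rw [hlen]; exact h1) (by rw [hlen]; exact h2), hlen]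
      congr 2
      rw [List.getElem_reverse]
      congr 1
      omega
  rw [hlist]
  apply String.toList_inj.mp
  simp [pysem]

theorem branch180 (array : List (List Int)) (index : Int)
    (hne : array ≠ []) (hsq : ∀ row ∈ array, row.length = array.length)
    (h1 : -(array.length : Int) ≤ index) (h2 : index < (array.length : Int)) :
    (PySem.List.pyRange 0 (array.length : Int) 1).foldl
      (fun value a =>
        value ++ PySem.Int.toStr (PySem.List.pyGetD (PySem.List.pyGetD array (-(index + 1)) []) (-(a + 1)) 0)) ""
      = solution_alt array 180 index := by
  have hn : 0 < array.length := by cases array with | nil => exact absurd rfl hne | cons _ _ => simp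
  have hget : PySem.Dict.get? (PySem.Dict.ofList [((90 : Int), (1 : Nat)), (180, 2), (270, 3)]) 180
      = some 2 := by decide
  unfold solution_alt
  rw [hget]
  simp only [show List.range 2 = [0, 1] from rfl, List.foldl_cons, List.foldl_nil]
  rw [pyZipStar_square array.reverse array.length (by simp [hne])
    (fun r hr => hsq r (List.mem_reverse.mp hr))]
  rw [pyZipStar_square _ array.length (by simp; omega)
    (fun r hr => by
      rcases List.mem_map.mp (List.mem_reverse.mp hr) with ⟨i, _, rfl⟩
      simp)]
  rw [pyGetD_wrap _ _ index (by simpa using h1) (by simpa using h2)]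
  simp only [List.length_map, List.length_range]
  rw [PySem.List.getD_map_range _ _ _ _ (by split_ifs <;> omega)]
  rw [strfold]
  set IFn : Nat := if index < 0 then (index + (array.length : Int)).toNat else index.toNat with hIFn
  have hIFlt : IFn < array.length := by rw [hIFn]; split_ifs <;> omega
  set R := PySem.List.pyGetD array (-(index + 1)) [] with hRdef
  have hRmem : R ∈ array := PySem.List.pyGetD_mem array [] (by simp only [PySem.Raise.InRange]; omega)
  have hRlen : R.length = array.length := hsq _ hRmem
  have hRval : R = array.getD (array.length - 1 - IFn) [] := by
    rw [hRdef, pyGetD_wrap array [] (-(index + 1)) (by omega) (by omega)]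
    congr 1
    rw [hIFn]
    split_ifs <;> omega
  have hlist : (PySem.List.pyRange 0 (array.length : Int) 1).map
      (fun a => PySem.Int.toStr (PySem.List.pyGetD R (-(a + 1)) 0))
      = ((((List.range array.length).map
            (fun i => array.reverse.map (fun r => r.getD i 0))).reverse).map
          (fun r => r.getD IFn 0)).map (fun v => PySem.Int.toStr v) := by
    rw [PySem.List.pyRange_one]
    simp only [List.map_map]
    apply List.ext_getElem
    · simp
    · intro i hi1 hi2
      simp only [List.getElem_map, List.getElem_reverse, List.getElem_range, Function.comp,
        List.length_map, List.length_range]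
      have hilt : i < array.length := by simpa using hi1
      have hglen : (array[array.length - 1 - IFn]'(by omega)).length = array.length :=
        hsq _ (List.getElem_mem _)
      have hcast : -((0 : Int) + (i : Int) + 1) = -(((i + 1 : Nat) : Int)) := by push_cast; ring
      rw [hcast, PySem.List.pyGetD_neg_natCast R (i + 1) 0 (by omega) (by omega)]
      rw [List.getD_eq_getElem _ _ (by simp; omega)]
      simp only [List.getElem_map, List.getElem_reverse]
      rw [List.getD_eq_getElem _ _ (by omega)]
      have hRval' : R = array[array.length - 1 - IFn]'(by omega) := by
        rw [hRval, List.getD_eq_getElem array _ (by omega)]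
      simp only [hRval']
      have hglen2 : (array[array.length - 1 - IFn]'(by omega)).length = array.length :=
        hsq _ (List.getElem_mem _)
      simp only [hglen2]
      have hix : array.length - (i + 1) = array.length - 1 - i := by omega
      simp only [hix]
  rw [hlist]
  apply String.toList_inj.mp
  simp [pysem]

theorem branch270 (array : List (List Int)) (index : Int)
    (hne : array ≠ []) (hsq : ∀ row ∈ array, row.length = array.length)
    (h1 : -(array.length : Int) ≤ index) (h2 : index < (array.length : Int)) :
    (PySem.List.pyRange 0 (array.length : Int) 1).foldl
      (fun value a =>
        value ++ PySem.Int.toStr (PySem.List.pyGetD (PySem.List.pyGetD array a []) (-(index + 1)) 0)) ""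
      = solution_alt array 270 index := by
  have hn : 0 < array.length := by cases array with | nil => exact absurd rfl hne | cons _ _ => simp
  have hget : PySem.Dict.get? (PySem.Dict.ofList [((90 : Int), (1 : Nat)), (180, 2), (270, 3)]) 270
      = some 3 := by decide
  unfold solution_alt
  rw [hget]
  simp only [show List.range 3 = [0, 1, 2] from rfl, List.foldl_cons, List.foldl_nil]
  rw [pyZipStar_square array.reverse array.length (by simp [hne])
    (fun r hr => hsq r (List.mem_reverse.mp hr))]
  rw [pyZipStar_square ((List.range array.length).map
      (fun i => array.reverse.map (fun r => r.getD i 0))).reverse array.length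
    (by simp; omega)
    (fun r hr => by
      rcases List.mem_map.mp (List.mem_reverse.mp hr) with ⟨i, _, rfl⟩
      simp)]
  rw [pyZipStar_square ((List.range array.length).map
      (fun i => ((List.range array.length).map
          (fun i => array.reverse.map (fun r => r.getD i 0))).reverse.map
        (fun r => r.getD i 0))).reverse array.length
    (by simp; omega)
    (fun r hr => by
      rcases List.mem_map.mp (List.mem_reverse.mp hr) with ⟨i, _, rfl⟩
      simp)]
  rw [pyGetD_wrap _ _ index (by simpa using h1) (by simpa using h2)]
  simp only [List.length_map, List.length_range]
  rw [PySem.List.getD_map_range _ _ _ _ (by split_ifs <;> omega)]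
  rw [strfold]
  set IFn : Nat := if index < 0 then (index + (array.length : Int)).toNat else index.toNat with hIFn
  have hIFlt : IFn < array.length := by rw [hIFn]; split_ifs <;> omega
  have hlist : (PySem.List.pyRange 0 (array.length : Int) 1).map
      (fun a => PySem.Int.toStr (PySem.List.pyGetD (PySem.List.pyGetD array a []) (-(index + 1)) 0))
      = (((((List.range array.length).map
              (fun i => ((List.range array.length).map
                  (fun i => array.reverse.map (fun r => r.getD i 0))).reverse.map
                (fun r => r.getD i 0))).reverse).map
            (fun r => r.getD IFn 0))).map (fun v => PySem.Int.toStr v) := by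
    rw [PySem.List.pyRange_one]
    simp only [List.map_map]
    apply List.ext_getElem
    · simp
    · intro i hi1 hi2
      simp only [List.getElem_map, List.getElem_reverse, List.getElem_range, Function.comp,
        List.length_map, List.length_range]
      have hilt : i < array.length := by simpa using hi1
      -- left side: array[a][-(index+1)]
      have hz : ((0 : Int) + (i : Int)) = ((i : Nat) : Int) := by omega
      rw [hz, PySem.List.pyGetD_natCast]
      rw [List.getD_eq_getElem array _ hilt]
      have hrowlen : (array[i]'hilt).length = array.length := hsq _ (List.getElem_mem _)
      rw [pyGetD_wrap (array[i]'hilt) 0 (-(index + 1)) (by rw [hrowlen]; omega)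
        (by rw [hrowlen]; omega)]
      have hixL : (if -(index + 1) < 0 then (-(index + 1) + ((array[i]'hilt).length : Int)).toNat
          else (-(index + 1)).toNat) = array.length - 1 - IFn := by
        rw [hrowlen, hIFn]; split_ifs <;> omega
      rw [hixL, List.getD_eq_getElem _ _ (by omega)]
      -- right side: unfold the three rotation layers
      rw [List.getD_eq_getElem _ _ (by simp; omega)]
      simp only [List.getElem_map, List.getElem_reverse, List.length_map, List.length_range,
        List.getElem_range]
      rw [List.getD_eq_getElem _ _ (by simp; omega)]
      simp only [List.getElem_map, List.getElem_reverse]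
      have hglen3 : (array[array.length - 1 - (array.length - 1 - i)]'(by omega)).length
          = array.length := hsq _ (List.getElem_mem _)
      rw [List.getD_eq_getElem _ _ (by omega)]
      have hfix : array.length - 1 - (array.length - 1 - i) = i := by omega
      simp only [hfix]
  rw [hlist]
  apply String.toList_inj.mp
  simp [pysem]

theorem solution_alt_other (array : List (List Int)) (angle index : Int)
    (h90 : angle ≠ 90) (h180 : angle ≠ 180) (h270 : angle ≠ 270) :
    solution_alt array angle index = "" := by
  unfold solution_alt
  have hofl : PySem.Dict.ofList [((90 : Int), (1 : Nat)), (180, 2), (270, 3)]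
      = PySem.Dict.mk [((90 : Int), (1 : Nat)), (180, 2), (270, 3)] := by decide
  rw [hofl, PySem.Dict.get?_mk_cons, PySem.Dict.get?_mk_cons, PySem.Dict.get?_mk_cons]
  simp [h90.symm, h180.symm, h270.symm, PySem.Dict.get?]

-- ===== VERDICT (by name: the statement is the Claim_ definition above) =====
theorem solution_spec : Claim_equal_solution := by
  intro array angle index _ hpre
  unfold Spec_solution solution
  by_cases h90 : angle = 90
  · obtain ⟨hne, hsq, hi1, hi2⟩ :=
      hpre.resolve_right (fun h => h.1 h90) |>.2
    rw [if_pos h90, h90, branch90 array index hne hsq hi1 hi2]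
  · by_cases h180 : angle = 180
    · obtain ⟨hne, hsq, hi1, hi2⟩ :=
        hpre.resolve_right (fun h => h.2.1 h180) |>.2
      rw [if_neg h90, if_pos h180, h180, branch180 array index hne hsq hi1 hi2]
    · by_cases h270 : angle = 270
      · obtain ⟨hne, hsq, hi1, hi2⟩ :=
          hpre.resolve_right (fun h => h.2.2 h270) |>.2
        rw [if_neg h90, if_neg h180, if_pos h270, h270, branch270 array index hne hsq hi1 hi2]
      · rw [if_neg h90, if_neg h180, if_neg h270, solution_alt_other array angle index h90 h180 h270]
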